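-- pv_equiv track=rewrite | github.com/jinen-rathore/Leetcode | 2038-remove-colored-pieces-if-both-neighbors-are-the-same-color/2038-remove-colored-pieces-if-both-neighbors-are-the-same-color.py | winnerOfGame
-- ===== SOURCE A (Python) =====
-- def winnerOfGame(colors: str) -> bool:
--     countA, countB = 0, 0
--     # we just check the count of occuring triplets of AAA and BBB
--     for i in range(1, len(colors) - 1):
--         if colors[i] == "A" and colors[i-1] == "A" and colors[i+1] == "A":
--             countA += 1
--
--         if colors[i] == "B" and colors[i-1] == "B" and colors[i+1] == "B":
--             countB += 1
--
--     # if the chances of alice is greater than bob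
--     # alice will win
--     # if the chances of bob are greater than alice, bob will win
--     # if there are equal chances then as alice is starting first
--     # bob will win
--     return countA - countB >= 1
-- ===== SOURCE B (Python) =====
-- def _step(state, ch):
--     rc, rl, ca, cb = state
--     if rc == ch:
--         return (rc, rl + 1, ca, cb)
--     elif rc == 'A':
--         return (ch, 1, ca + max(0, rl - 2), cb)
--     elif rc == 'B':
--         return (ch, 1, ca, cb + max(0, rl - 2))
--     else:
--         return (ch, 1, ca, cb)
--
--
-- def _flush(state):
--     rc, rl, ca, cb = state
--     if rc == 'A':
--         return (ca + max(0, rl - 2), cb)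
--     elif rc == 'B':
--         return (ca, cb + max(0, rl - 2))
--     else:
--         return (ca, cb)
--
--
-- def winnerOfGame(colors: str) -> bool:
--     # run-length decomposition: each maximal run of length L contributes max(0, L-2)
--     state = ('', 0, 0, 0)  # (run_char, run_len, countA, countB)
--     for ch in colors:
--         state = _step(state, ch)
--     countA, countB = _flush(state)
--     return countA - countB >= 1
-- ===== Notes on version B (the rewrite author's own statement) =====
-- stated objective: alternative
-- what changed: A slides a per-index window over positions 1..n-2 testing colors[i-1..i+1] for each of 'A' and 'B'; B never indexes: it decomposes the string into maximal runs of equal characters with a run-length accumulator and adds max(0, run_length-2) to the matching player's count per completed run.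
import Mathlib
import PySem

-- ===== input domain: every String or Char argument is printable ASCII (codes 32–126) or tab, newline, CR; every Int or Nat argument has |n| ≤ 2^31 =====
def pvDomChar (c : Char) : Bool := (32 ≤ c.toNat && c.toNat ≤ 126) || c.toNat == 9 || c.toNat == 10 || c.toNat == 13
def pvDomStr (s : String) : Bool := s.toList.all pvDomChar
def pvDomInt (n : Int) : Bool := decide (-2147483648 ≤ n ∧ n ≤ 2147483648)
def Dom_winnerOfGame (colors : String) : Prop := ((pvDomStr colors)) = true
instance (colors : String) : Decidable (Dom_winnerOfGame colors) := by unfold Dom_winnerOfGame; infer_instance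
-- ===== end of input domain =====

-- B replaces A's per-index triplet window with a run-length decomposition (each maximal
-- run of length L contributes max(0, L-2)); objective: alternative decomposition, same cost.

-- ===== PORT A =====
def winnerOfGame (colors : String) : Bool :=
  let r := (PySem.List.pyRange 1 (PySem.Str.len colors - 1) 1).foldl
    (fun (p : Int × Int) i =>
      let p1 := if PySem.Str.pyGet? colors i = some 'A' ∧ PySem.Str.pyGet? colors (i-1) = some 'A' ∧ PySem.Str.pyGet? colors (i+1) = some 'A'
        then (p.1 + 1, p.2) else p
      if PySem.Str.pyGet? colors i = some 'B' ∧ PySem.Str.pyGet? colors (i-1) = some 'B' ∧ PySem.Str.pyGet? colors (i+1) = some 'B'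
        then (p1.1, p1.2 + 1) else p1)
    (0, 0)
  decide (1 ≤ r.1 - r.2)

-- ===== PORT B =====
-- state = (run_char, run_len, countA, countB); run_char = none plays Python's '' sentinel
def bStep (s : Option Char × Int × Int × Int) (ch : Char) : Option Char × Int × Int × Int :=
  let (rc, rl, ca, cb) := s
  if rc = some ch then (rc, rl + 1, ca, cb)
  else if rc = some 'A' then (some ch, 1, ca + max 0 (rl - 2), cb)
  else if rc = some 'B' then (some ch, 1, ca, cb + max 0 (rl - 2))
  else (some ch, 1, ca, cb)

def bFlush (s : Option Char × Int × Int × Int) : Int × Int :=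
  let (rc, rl, ca, cb) := s
  if rc = some 'A' then (ca + max 0 (rl - 2), cb)
  else if rc = some 'B' then (ca, cb + max 0 (rl - 2))
  else (ca, cb)

def winnerOfGame_alt (colors : String) : Bool :=
  let st := colors.toList.foldl bStep (none, 0, 0, 0)
  let p := bFlush st
  decide (1 ≤ p.1 - p.2)

-- ===== PRECONDITION & SPEC =====
def Spec_winnerOfGame (colors : String) (out : Bool) : Prop := out = winnerOfGame_alt colors
instance (colors : String) (out : Bool) : Decidable (Spec_winnerOfGame colors out) := by unfold Spec_winnerOfGame; infer_instance

-- ===== CLAIM (what is proved, stated in full; the proofs are below) =====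
def Claim_equal_winnerOfGame : Prop := ∀ (colors : String), Dom_winnerOfGame colors → Spec_winnerOfGame colors (winnerOfGame colors)

-- ===== LEMMAS AND PROOFS =====

-- number of indices i with l[i-1] = l[i] = l[i+1] = c, exactly as A counts them
def tripI (c : Char) : List Char → Int
  | x :: y :: z :: t => (if y = c ∧ x = c ∧ z = c then 1 else 0) + tripI c (y :: z :: t)
  | _ => 0

-- the list of consecutive character triples of a list
def triples : List Char → List (Char × Char × Char)
  | x :: y :: z :: t => (x, y, z) :: triples (y :: z :: t)
  | _ => []

theorem pyGet?_cons_of_pos (a : Char) (xs : List Char) (i : Int) (h : 1 ≤ i) :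
    PySem.List.pyGet? (a :: xs) i = PySem.List.pyGet? xs (i - 1) := by
  obtain ⟨n, rfl⟩ : ∃ n : Nat, i = (n : Int) + 1 := ⟨(i - 1).toNat, by omega⟩
  rw [PySem.List.pyGet?_cons_succ]
  norm_num

theorem map_range_triples (l : List Char) :
    (PySem.List.pyRange 1 ((l.length : Int) - 1) 1).map
      (fun i => (PySem.List.pyGet? l i, PySem.List.pyGet? l (i-1), PySem.List.pyGet? l (i+1)))
    = (triples l).map (fun t => ((some t.2.1 : Option Char), some t.1, some t.2.2)) := by
  induction l with
  | nil => simp [triples]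
  | cons a rest ih =>
    match rest with
    | [] => simp [triples]
    | [b] => simp [triples]
    | b :: c :: t =>
      rw [triples, PySem.List.pyRange_one_cons (by simp), List.map_cons, List.map_cons]
      congr 1
      · norm_num [pyGet?_cons_of_pos, PySem.List.pyGet?_zero_cons]
      rw [← ih]
      norm_num
      rw [PySem.List.pyRange_one 2, PySem.List.pyRange_one 1]
      have hm : ((t.length : Int) + 1 + 1 - 2).toNat = ((t.length : Int) + 1 - 1).toNat := by omega
      rw [hm, List.map_map, List.map_map]
      apply List.map_congr_left
      intro k hk
      simp only [Function.comp]
      rw [pyGet?_cons_of_pos a _ _ (by omega), pyGet?_cons_of_pos a _ _ (by omega),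
          pyGet?_cons_of_pos a _ _ (by omega)]
      rw [show (2:Int) + (k:Int) - 1 = 1 + (k:Int) from by omega,
          show (2:Int) + (k:Int) + 1 - 1 = 1 + (k:Int) + 1 from by omega]

theorem foldl_triples_count (l : List Char) (a b : Int) :
    (triples l).foldl
      (fun (p : Int × Int) (t : Char × Char × Char) =>
        (p.1 + (if t.2.1 = 'A' ∧ t.1 = 'A' ∧ t.2.2 = 'A' then 1 else 0),
         p.2 + (if t.2.1 = 'B' ∧ t.1 = 'B' ∧ t.2.2 = 'B' then 1 else 0))) (a, b)
    = (a + tripI 'A' l, b + tripI 'B' l) := by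
  induction l generalizing a b with
  | nil => simp [triples, tripI]
  | cons x rest ih =>
    match rest with
    | [] => simp [triples, tripI]
    | [y] => simp [triples, tripI]
    | y :: z :: t =>
      rw [triples, tripI, tripI, List.foldl_cons, ih]
      apply Prod.ext <;> simp <;> ring

theorem tripI_replicate (c' c : Char) (k : Nat) :
    tripI c' (List.replicate k c) = if c' = c then max 0 ((k : Int) - 2) else 0 := by
  induction k using Nat.strong_induction_on with
  | _ k ih =>
    match k with
    | 0 => simp [tripI]
    | 1 => simp [tripI]
    | 2 => simp [List.replicate, tripI]
    | (m+3) =>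
      have h3 : List.replicate (m+3) c = c :: c :: c :: List.replicate m c := by
        simp [List.replicate_succ]
      have h2 : (c : Char) :: c :: List.replicate m c = List.replicate (m+2) c := by
        simp [List.replicate_succ]
      rw [h3, tripI, h2, ih (m+2) (by omega)]
      by_cases hc : c' = c
      · simp only [hc, and_self, if_true]
        push_cast
        omega
      · simp [hc, Ne.symm hc]

theorem tripI_replicate_append (c' c x : Char) (l : List Char) (k : Nat) (hx : x ≠ c) :
    tripI c' (List.replicate k c ++ x :: l)
      = (if c' = c then max 0 ((k : Int) - 2) else 0) + tripI c' (x :: l) := by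
  induction k using Nat.strong_induction_on with
  | _ k ih =>
    match k with
    | 0 => simp
    | 1 =>
      have h1 : List.replicate 1 c ++ x :: l = c :: x :: l := by simp
      rw [h1]
      match l with
      | [] => simp [tripI]
      | e :: l' =>
        rw [tripI]
        have hind : ¬ (x = c' ∧ c = c' ∧ e = c') := by
          by_cases hc : c' = c
          · rintro ⟨hxc, -, -⟩; exact hx (hxc.trans hc)
          · rintro ⟨-, hcc, -⟩; exact hc hcc.symm
        simp [hind]
    | (m+2) =>
      have h3 : List.replicate (m+2) c ++ x :: l = c :: c :: (List.replicate m c ++ x :: l) := by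
        simp [List.replicate_succ]
      match m with
      | 0 =>
        rw [h3]
        simp only [List.replicate]
        rw [List.nil_append, tripI]
        have hind : ¬ (c = c' ∧ c = c' ∧ x = c') := by
          by_cases hc : c' = c
          · rintro ⟨-, -, hxc⟩; exact hx (hxc.trans hc)
          · rintro ⟨hcc, -, -⟩; exact hc hcc.symm
        have h1 := ih 1 (by omega)
        simp only [List.replicate, List.singleton_append] at h1
        rw [h1]
        by_cases hc : c' = c <;> simp [hind, hc] <;> omega
      | (n+1) =>
        rw [h3]
        have h4 : List.replicate (n+1) c ++ x :: l = c :: (List.replicate n c ++ x :: l) := by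
          simp [List.replicate_succ]
        rw [h4, tripI, ← h4]
        have h6 := ih (n+2) (by omega)
        rw [show (c :: (List.replicate (n+1) c ++ x :: l)) = List.replicate (n+2) c ++ x :: l by
              simp [List.replicate_succ], h6]
        by_cases hc : c' = c
        · simp only [hc, and_self, if_true]
          push_cast
          omega
        · simp [hc, Ne.symm hc]

theorem bInv (l : List Char) : ∀ (c : Char) (k : Nat) (ca cb : Int), 1 ≤ k →
    bFlush (l.foldl bStep (some c, (k : Int), ca, cb))
      = (ca + tripI 'A' (List.replicate k c ++ l), cb + tripI 'B' (List.replicate k c ++ l)) := by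
  induction l with
  | nil =>
    intro c k ca cb hk
    simp only [List.foldl_nil, List.append_nil, bFlush]
    rw [tripI_replicate, tripI_replicate]
    by_cases hA : c = 'A'
    · subst hA; simp
    · by_cases hB : c = 'B'
      · subst hB; simp [hA]
      · simp [hA, hB, Ne.symm]
  | cons ch l ih =>
    intro c k ca cb hk
    rw [List.foldl_cons]
    by_cases hceq : c = ch
    · subst hceq
      have hstep : bStep (some c, (k : Int), ca, cb) c = (some c, (k : Int) + 1, ca, cb) := by
        simp [bStep]
      rw [hstep, show ((k : Int) + 1) = ((k + 1 : Nat) : Int) by push_cast; ring,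
          ih c (k+1) ca cb (by omega)]
      have : List.replicate k c ++ c :: l = List.replicate (k+1) c ++ l := by
        rw [List.replicate_succ', List.append_assoc]; simp
      rw [this]
    · have hne : ¬ (some c = some ch) := by simp [hceq]
      by_cases hA : c = 'A'
      · subst hA
        have hstep : bStep (some 'A', (k : Int), ca, cb) ch
            = (some ch, 1, ca + max 0 ((k : Int) - 2), cb) := by simp [bStep, hne]
        rw [hstep, show (1 : Int) = ((1 : Nat) : Int) by norm_num,
            ih ch 1 _ _ (by omega)]
        rw [tripI_replicate_append 'A' 'A' ch l k (fun h => hceq h.symm),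
            tripI_replicate_append 'B' 'A' ch l k (fun h => hceq h.symm)]
        simp; ring
      · by_cases hB : c = 'B'
        · subst hB
          have hstep : bStep (some 'B', (k : Int), ca, cb) ch
              = (some ch, 1, ca, cb + max 0 ((k : Int) - 2)) := by simp [bStep, hne, hA]
          rw [hstep, show (1 : Int) = ((1 : Nat) : Int) by norm_num,
              ih ch 1 _ _ (by omega)]
          rw [tripI_replicate_append 'A' 'B' ch l k (fun h => hceq h.symm),
              tripI_replicate_append 'B' 'B' ch l k (fun h => hceq h.symm)]
          simp; ring
        · have hstep : bStep (some c, (k : Int), ca, cb) ch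
              = (some ch, 1, ca, cb) := by simp [bStep, hne, hA, hB]
          rw [hstep, show (1 : Int) = ((1 : Nat) : Int) by norm_num,
              ih ch 1 _ _ (by omega)]
          rw [tripI_replicate_append 'A' c ch l k (fun h => hceq h.symm),
              tripI_replicate_append 'B' c ch l k (fun h => hceq h.symm)]
          have nA : ¬ ('A' = c) := fun h => hA h.symm
          have nB : ¬ ('B' = c) := fun h => hB h.symm
          simp [nA, nB]

theorem A_eq (colors : String) :
    winnerOfGame colors
      = decide (1 ≤ tripI 'A' colors.toList - tripI 'B' colors.toList) := by
  unfold winnerOfGame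
  have hlen : PySem.Str.len colors = ((colors.toList.length : Int)) := by
    simp [PySem.Str.len_eq]
  rw [hlen]
  have hstr : ∀ i : Int, PySem.Str.pyGet? colors i = PySem.List.pyGet? colors.toList i := by
    intro i; rfl
  simp only [hstr]
  have h1 :
      (PySem.List.pyRange 1 ((colors.toList.length : Int) - 1) 1).foldl
        (fun (p : Int × Int) i =>
          let p1 := if PySem.List.pyGet? colors.toList i = some 'A' ∧ PySem.List.pyGet? colors.toList (i-1) = some 'A' ∧ PySem.List.pyGet? colors.toList (i+1) = some 'A'
            then (p.1 + 1, p.2) else p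
          if PySem.List.pyGet? colors.toList i = some 'B' ∧ PySem.List.pyGet? colors.toList (i-1) = some 'B' ∧ PySem.List.pyGet? colors.toList (i+1) = some 'B'
            then (p1.1, p1.2 + 1) else p1)
        (0, 0)
      = ((PySem.List.pyRange 1 ((colors.toList.length : Int) - 1) 1).map
          (fun i => (PySem.List.pyGet? colors.toList i, PySem.List.pyGet? colors.toList (i-1), PySem.List.pyGet? colors.toList (i+1)))).foldl
          (fun (p : Int × Int) (t : Option Char × Option Char × Option Char) =>
            let p1 := if t.1 = some 'A' ∧ t.2.1 = some 'A' ∧ t.2.2 = some 'A'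
              then (p.1 + 1, p.2) else p
            if t.1 = some 'B' ∧ t.2.1 = some 'B' ∧ t.2.2 = some 'B'
              then (p1.1, p1.2 + 1) else p1)
          (0, 0) := by
    rw [List.foldl_map]
  rw [h1, map_range_triples, List.foldl_map]
  have h2 : (fun (p : Int × Int) (t : Char × Char × Char) =>
        let p1 := if (some t.2.1 : Option Char) = some 'A' ∧ (some t.1 : Option Char) = some 'A' ∧ (some t.2.2 : Option Char) = some 'A'
          then (p.1 + 1, p.2) else p
        if (some t.2.1 : Option Char) = some 'B' ∧ (some t.1 : Option Char) = some 'B' ∧ (some t.2.2 : Option Char) = some 'B'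
          then (p1.1, p1.2 + 1) else p1)
      = (fun (p : Int × Int) (t : Char × Char × Char) =>
        (p.1 + (if t.2.1 = 'A' ∧ t.1 = 'A' ∧ t.2.2 = 'A' then 1 else 0),
         p.2 + (if t.2.1 = 'B' ∧ t.1 = 'B' ∧ t.2.2 = 'B' then 1 else 0))) := by
    funext p t
    by_cases hA : t.2.1 = 'A' ∧ t.1 = 'A' ∧ t.2.2 = 'A' <;>
      by_cases hB : t.2.1 = 'B' ∧ t.1 = 'B' ∧ t.2.2 = 'B' <;>
        simp [hA, hB]
  rw [h2, foldl_triples_count]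
  simp

theorem B_eq (colors : String) :
    winnerOfGame_alt colors
      = decide (1 ≤ tripI 'A' colors.toList - tripI 'B' colors.toList) := by
  unfold winnerOfGame_alt
  rcases h : colors.toList with _ | ⟨x, rest⟩
  · simp [bFlush, tripI]
  · rw [List.foldl_cons]
    have hstep : bStep (none, 0, 0, 0) x = (some x, 1, 0, 0) := by simp [bStep]
    rw [hstep, show (1 : Int) = ((1 : Nat) : Int) by norm_num]
    simp only [bInv rest x 1 0 0 (by omega)]
    simp

-- ===== VERDICT (by name: the statement is the Claim_ definition above) =====
theorem winnerOfGame_spec : Claim_equal_winnerOfGame := by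
  intro colors _
  unfold Spec_winnerOfGame
  rw [A_eq, B_eq]
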